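-- pv_equiv track=rewrite | github.com/tangyisheng2/leetcode-note | code/841. Keys and Rooms.py | canVisitAllRooms2
-- ===== SOURCE A (Python) =====
-- from typing import List
--
-- def canVisitAllRooms2(rooms: List[List[int]]) -> bool:
--     """
--     DFS
--     :param rooms:
--     :return:
--     """
--
--     def dfs(idx):
--         for room in rooms[idx]:
--             if room not in visited:
--                 visited.add(room)
--                 dfs(room)
--
--     visited = set({0})
--     dfs(0)
--     return len(visited) == len(rooms)
-- ===== SOURCE B (Python) =====
-- from typing import List
--
-- def canVisitAllRooms2(rooms: List[List[int]]) -> bool: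
--     """Iterative worklist traversal instead of recursion."""
--     visited = {0}
--     stack = [0]
--     while stack:
--         node = stack.pop()
--         for key in rooms[node]:
--             if key not in visited:
--                 visited.add(key)
--                 stack.append(key)
--     return len(visited) == len(rooms)
-- ===== Notes on version B (the rewrite author's own statement) =====
-- stated objective: idiomatic
-- what changed: Replaces the recursive DFS with closure-over-mutable-set by an iterative traversal with an explicit worklist stack (pop a node, push newly discovered keys), avoiding Python recursion.
import Mathlib
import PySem

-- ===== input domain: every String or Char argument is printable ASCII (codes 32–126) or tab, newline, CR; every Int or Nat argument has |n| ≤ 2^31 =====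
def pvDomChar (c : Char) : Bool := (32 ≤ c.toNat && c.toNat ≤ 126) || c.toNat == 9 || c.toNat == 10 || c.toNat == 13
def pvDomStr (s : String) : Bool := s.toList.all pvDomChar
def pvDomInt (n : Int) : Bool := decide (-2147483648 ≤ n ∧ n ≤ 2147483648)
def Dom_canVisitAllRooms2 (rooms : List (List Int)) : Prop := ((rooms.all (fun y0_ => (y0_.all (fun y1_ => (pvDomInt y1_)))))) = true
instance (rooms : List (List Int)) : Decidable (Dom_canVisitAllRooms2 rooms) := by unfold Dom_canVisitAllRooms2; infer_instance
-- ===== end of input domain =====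

-- B replaces A's recursive DFS by an iterative explicit-stack traversal (idiomatic; return value proved equal).

-- ===== PORT A =====
-- Python A: recursive dfs over rooms[idx] with a shared mutable 'visited' set; the
-- recursion is ported with a fuel parameter (rooms.flatten.length + 1 levels always
-- suffice: each nested call has added one new key from rooms.flatten to visited).
def dfsA (rooms : List (List Int)) : Nat → PySem.Set Int → Int → PySem.Set Int
  | 0, visited, _ => visited
  | fuel+1, visited, idx =>
      ((PySem.List.pyGet? rooms idx).getD []).foldl
        (fun v room =>
          if PySem.Set.contains v room then v
          else dfsA rooms fuel (PySem.Set.add v room) room) visited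

def canVisitAllRooms2 (rooms : List (List Int)) : Bool :=
  let visited := PySem.Set.ofList ([0] : List Int)
  let visited := dfsA rooms (rooms.flatten.length + 1) visited 0
  visited.length == rooms.length

-- ===== PORT B =====
-- Python B: while stack: node = stack.pop(); for key in rooms[node]: if new, add and
-- push.  The while loop is ported with fuel (2*rooms.flatten.length + 2 iterations
-- always suffice: each iteration pops one node, and pushes only fresh flatten keys).
def loopB (rooms : List (List Int)) : Nat → PySem.Set Int → List Int → PySem.Set Int
  | 0, visited, _ => visited
  | fuel+1, visited, stack =>
      match stack with
      | [] => visited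
      | node :: rest =>
          let p := ((PySem.List.pyGet? rooms node).getD []).foldl
            (fun (p : PySem.Set Int × List Int) key =>
              if PySem.Set.contains p.1 key then p
              else (PySem.Set.add p.1 key, key :: p.2)) (visited, rest)
          loopB rooms fuel p.1 p.2

def canVisitAllRooms2_alt (rooms : List (List Int)) : Bool :=
  (loopB rooms (2 * rooms.flatten.length + 2) (PySem.Set.ofList ([0] : List Int)) [0]).length == rooms.length

-- ===== PRECONDITION & SPEC =====
-- helper for Pre_: one breadth step of the reachability closure from room 0
-- (expand every in-range node of s by the keys of its room, Python index wrap included)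
def pvCloseStep (rooms : List (List Int)) (s : List Int) : List Int :=
  PySem.Set.ofList (s ++ (s.filter (fun u => decide (-(rooms.length : Int) ≤ u ∧ u < (rooms.length : Int)))).flatMap
    (fun u => (PySem.List.pyGet? rooms u).getD []))

-- the stabilized reachability closure (flatten.length + 1 steps always stabilize)
def pvClosure (rooms : List (List Int)) : List Int :=
  (pvCloseStep rooms)^[rooms.flatten.length + 1] [0]

-- Pre_ excludes exactly the inputs on which Python A (and B) raise IndexError:
-- empty rooms (rooms[0] is indexed immediately) and inputs where some room index
-- reachable from 0 is out of range; on every other input A returns normally.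
def Pre_canVisitAllRooms2 (rooms : List (List Int)) : Prop :=
  rooms ≠ [] ∧ ∀ u ∈ pvClosure rooms, -(rooms.length : Int) ≤ u ∧ u < (rooms.length : Int)
instance (rooms : List (List Int)) : Decidable (Pre_canVisitAllRooms2 rooms) := by
  unfold Pre_canVisitAllRooms2; infer_instance
def pvWitness_canVisitAllRooms2 : List (List Int) := [[1], [0]]

def Spec_canVisitAllRooms2 (rooms : List (List Int)) (out : Bool) : Prop := out = canVisitAllRooms2_alt rooms
instance (rooms : List (List Int)) (out : Bool) : Decidable (Spec_canVisitAllRooms2 rooms out) := by unfold Spec_canVisitAllRooms2; infer_instance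

-- ===== CLAIM (what is proved, stated in full; the proofs are below) =====
def Claim_equal_canVisitAllRooms2 : Prop := ∀ (rooms : List (List Int)), Dom_canVisitAllRooms2 rooms → Pre_canVisitAllRooms2 rooms → Spec_canVisitAllRooms2 rooms (canVisitAllRooms2 rooms)

-- ===== LEMMAS AND PROOFS =====
-- the list Python iterates for 'rooms[i]' (out of range only reachable outside Pre_)
def nb (rooms : List (List Int)) (i : Int) : List Int := (PySem.List.pyGet? rooms i).getD []

-- keys reachable from room 0
inductive Reach (rooms : List (List Int)) : Int → Prop
  | zero : Reach rooms 0
  | step {u k : Int} : Reach rooms u → k ∈ nb rooms u → Reach rooms k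

-- number of flatten keys not yet visited (fuel measure)
def miss (rooms : List (List Int)) (v : List Int) : Nat :=
  (rooms.flatten.toFinset \ v.toFinset).card

lemma nb_sub_flatten {rooms : List (List Int)} {i x : Int} (h : x ∈ nb rooms i) :
    x ∈ rooms.flatten := by
  unfold nb at h
  cases hg : PySem.List.pyGet? rooms i with
  | none => simp [hg] at h
  | some l =>
      rw [hg] at h
      exact List.mem_flatten.2 ⟨l, PySem.List.mem_of_pyGet?_eq_some _ hg, h⟩

lemma mem_add_left {v : List Int} {x y : Int} (h : y ∈ v) : y ∈ PySem.Set.add v x :=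
  (PySem.Set.mem_add v x y).2 (Or.inl h)

lemma mem_add_self (v : List Int) (x : Int) : x ∈ PySem.Set.add v x :=
  (PySem.Set.mem_add v x x).2 (Or.inr rfl)

lemma contains_true {v : List Int} {x : Int} (h : x ∈ v) : PySem.Set.contains v x = true :=
  (PySem.Set.contains_iff v x).2 h

lemma contains_false {v : List Int} {x : Int} (h : x ∉ v) : PySem.Set.contains v x = false := by
  cases hc : PySem.Set.contains v x
  · rfl
  · exact absurd ((PySem.Set.contains_iff v x).1 hc) h


lemma if_cont_true {γ : Sort _} {v : List Int} {x : Int} (h : x ∈ v) (X Y : γ) :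
    (if PySem.Set.contains v x then X else Y) = X := by
  rw [contains_true h]; simp

lemma if_cont_false {γ : Sort _} {v : List Int} {x : Int} (h : x ∉ v) (X Y : γ) :
    (if PySem.Set.contains v x then X else Y) = Y := by
  rw [contains_false h]; simp

lemma miss_add_lt {rooms : List (List Int)} {v : List Int} {x : Int}
    (hx : x ∈ rooms.flatten) (hnv : x ∉ v) :
    miss rooms (PySem.Set.add v x) < miss rooms v := by
  unfold miss
  rw [PySem.Set.add_eq_ite, if_neg hnv]
  apply Finset.card_lt_card
  constructor
  · apply Finset.sdiff_subset_sdiff (Finset.Subset.refl _)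
    intro y hy
    simp only [List.mem_toFinset] at hy ⊢
    exact List.mem_append.2 (Or.inl hy)
  · intro hsub
    have hmem : x ∈ rooms.flatten.toFinset \ v.toFinset := by
      simp [Finset.mem_sdiff, List.mem_toFinset, hx, hnv]
    have := hsub hmem
    simp [Finset.mem_sdiff, List.mem_toFinset] at this

lemma miss_mono {rooms : List (List Int)} {v w : List Int}
    (h : ∀ x ∈ v, x ∈ w) : miss rooms w ≤ miss rooms v := by
  unfold miss
  apply Finset.card_le_card
  intro y hy
  simp only [Finset.mem_sdiff, List.mem_toFinset] at hy ⊢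
  exact ⟨hy.1, fun hv => hy.2 (h y hv)⟩

-- ---------- A side ----------

lemma dfsA_mono (rooms : List (List Int)) :
    ∀ (fuel : Nat) (idx : Int) (v : PySem.Set Int) (x : Int), x ∈ v → x ∈ dfsA rooms fuel v idx := by
  intro fuel
  induction fuel with
  | zero => intro idx v x hx; simpa [dfsA] using hx
  | succ f ih =>
      intro idx v x hx
      rw [dfsA]
      refine List.foldlRecOn (motive := fun b => x ∈ b) _ _ hx ?_
      intro b hb a _
      by_cases hm : a ∈ b
      · rw [if_cont_true hm]; exact hb
      · rw [if_cont_false hm]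
        exact ih a (PySem.Set.add b a) x (mem_add_left hb)

lemma dfsA_nodup (rooms : List (List Int)) :
    ∀ (fuel : Nat) (idx : Int) (v : PySem.Set Int), v.Nodup → (dfsA rooms fuel v idx).Nodup := by
  intro fuel
  induction fuel with
  | zero => intro idx v h; simpa [dfsA] using h
  | succ f ih =>
      intro idx v h
      rw [dfsA]
      refine List.foldlRecOn (motive := fun (b : PySem.Set Int) => b.Nodup) _ _ h ?_
      intro b hb a _
      by_cases hm : a ∈ b
      · rw [if_cont_true hm]; exact hb
      · rw [if_cont_false hm]
        exact ih a _ (PySem.Set.nodup_add b a hb)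

lemma dfsA_sound (rooms : List (List Int)) :
    ∀ (fuel : Nat) (idx : Int) (v : PySem.Set Int),
      (∀ x ∈ v, Reach rooms x) → Reach rooms idx →
      ∀ x ∈ dfsA rooms fuel v idx, Reach rooms x := by
  intro fuel
  induction fuel with
  | zero => intro idx v hv _ x hx; rw [dfsA] at hx; exact hv x hx
  | succ f ih =>
      intro idx v hv hidx
      rw [dfsA]
      refine List.foldlRecOn (motive := fun b => ∀ x ∈ b, Reach rooms x) _ _ hv ?_
      intro b hb a ha
      by_cases hm : a ∈ b
      · rw [if_cont_true hm]; exact hb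
      · rw [if_cont_false hm]
        have hra : Reach rooms a := Reach.step hidx (show a ∈ nb rooms idx from ha)
        refine ih a (PySem.Set.add b a) ?_ hra
        intro y hy
        rcases (PySem.Set.mem_add b a y).1 hy with h | h
        · exact hb y h
        · subst h; exact hra

-- saturation: with enough fuel the DFS visits rooms[idx] and everything it adds is closed
lemma dfsA_sat (rooms : List (List Int)) :
    ∀ (fuel : Nat) (idx : Int) (v : PySem.Set Int), miss rooms v < fuel →
      (∀ k ∈ nb rooms idx, k ∈ dfsA rooms fuel v idx) ∧
      (∀ u ∈ dfsA rooms fuel v idx, u ∉ v → ∀ k ∈ nb rooms u, k ∈ dfsA rooms fuel v idx) := by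
  intro fuel
  induction fuel with
  | zero => intro idx v h; omega
  | succ f ih =>
      intro idx v hmiss
      suffices H : ∀ (l : List Int) (v : PySem.Set Int), (∀ r ∈ l, r ∈ rooms.flatten) →
          miss rooms v ≤ f →
          (∀ x ∈ v, x ∈ l.foldl (fun v room => if PySem.Set.contains v room then v
              else dfsA rooms f (PySem.Set.add v room) room) v) ∧
          (∀ r ∈ l, r ∈ l.foldl (fun v room => if PySem.Set.contains v room then v
              else dfsA rooms f (PySem.Set.add v room) room) v) ∧
          (∀ u ∈ l.foldl (fun v room => if PySem.Set.contains v room then v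
              else dfsA rooms f (PySem.Set.add v room) room) v, u ∉ v →
            ∀ k ∈ nb rooms u, k ∈ l.foldl (fun v room => if PySem.Set.contains v room then v
              else dfsA rooms f (PySem.Set.add v room) room) v) by
        have h := H (nb rooms idx) v (fun r hr => nb_sub_flatten hr) (by omega)
        rw [dfsA]
        exact ⟨h.2.1, h.2.2⟩
      intro l
      induction l with
      | nil => intro v _ _; exact ⟨fun x hx => hx, by simp, fun u hu hnv k hk => absurd hu hnv⟩
      | cons r rest ihl =>
          intro v hl hmv
          by_cases hm : r ∈ v
          · have hstep : (if PySem.Set.contains v r then v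
                else dfsA rooms f (PySem.Set.add v r) r) = v := by
              exact if_cont_true hm _ _
            simp only [List.foldl_cons, hstep]
            obtain ⟨hmono, hmem, hsat⟩ := ihl v (fun x hx => hl x (List.mem_cons_of_mem _ hx)) hmv
            refine ⟨hmono, ?_, hsat⟩
            intro x hx
            rcases List.mem_cons.1 hx with h | h
            · exact h ▸ hmono r hm
            · exact hmem x h
          · have hrf : r ∈ rooms.flatten := hl r List.mem_cons_self
            have hstep : (if PySem.Set.contains v r then v
                else dfsA rooms f (PySem.Set.add v r) r) = dfsA rooms f (PySem.Set.add v r) r := by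
              exact if_cont_false hm _ _
            have hlt : miss rooms (PySem.Set.add v r) < miss rooms v := miss_add_lt hrf hm
            have hsat1 := ih r (PySem.Set.add v r) (by omega)
            set v1 := dfsA rooms f (PySem.Set.add v r) r with hv1
            have hmono1 : ∀ x ∈ PySem.Set.add v r, x ∈ v1 := fun x hx =>
              dfsA_mono rooms f r (PySem.Set.add v r) x hx
            have hmv1 : miss rooms v1 ≤ f := by
              have := miss_mono (rooms := rooms) hmono1
              omega
            obtain ⟨hmono2, hmem2, hsat2⟩ :=
              ihl v1 (fun x hx => hl x (List.mem_cons_of_mem _ hx)) hmv1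
            simp only [List.foldl_cons, hstep, ← hv1]
            refine ⟨?_, ?_, ?_⟩
            · intro x hx; exact hmono2 x (hmono1 x (mem_add_left hx))
            · intro x hx
              rcases List.mem_cons.1 hx with h | h
              · exact h ▸ hmono2 r (hmono1 r (mem_add_self v r))
              · exact hmem2 x h
            · intro u hu hnv k hk
              by_cases hu1 : u ∈ v1
              · by_cases hua : u ∈ PySem.Set.add v r
                · have hur : u = r := by
                    rcases (PySem.Set.mem_add v r u).1 hua with h | h
                    · exact absurd h hnv
                    · exact h
                  subst hur
                  exact hmono2 k (hsat1.1 k hk)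
                · exact hmono2 k (hsat1.2 u hu1 hua k hk)
              · exact hsat2 u hu hu1 k hk

-- the DFS from room 0 computes exactly the reachable set
def finalA (rooms : List (List Int)) : PySem.Set Int :=
  dfsA rooms (rooms.flatten.length + 1) (PySem.Set.ofList ([0] : List Int)) 0

lemma ofList_zero : PySem.Set.ofList ([0] : List Int) = [0] :=
  PySem.Set.ofList_eq_self_of_nodup _ (by simp)

lemma miss_init_le (rooms : List (List Int)) :
    miss rooms ([0] : List Int) ≤ rooms.flatten.length := by
  unfold miss
  calc (rooms.flatten.toFinset \ ([0] : List Int).toFinset).card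
      ≤ rooms.flatten.toFinset.card := Finset.card_le_card Finset.sdiff_subset
    _ ≤ rooms.flatten.length := List.toFinset_card_le _

lemma finalA_iff (rooms : List (List Int)) :
    ∀ x, x ∈ finalA rooms ↔ Reach rooms x := by
  have hmiss : miss rooms (PySem.Set.ofList ([0] : List Int)) < rooms.flatten.length + 1 := by
    rw [ofList_zero]
    have := miss_init_le rooms
    omega
  have hsat := dfsA_sat rooms (rooms.flatten.length + 1) 0 (PySem.Set.ofList ([0] : List Int)) hmiss
  intro x
  constructor
  · intro hx
    refine dfsA_sound rooms _ 0 _ ?_ Reach.zero x hx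
    rw [ofList_zero]
    intro y hy
    have : y = 0 := by simpa using hy
    subst this; exact Reach.zero
  · intro hr
    induction hr with
    | zero =>
        refine dfsA_mono rooms _ 0 _ 0 ?_
        rw [ofList_zero]; simp
    | step hru hk ihu =>
        rename_i u k
        by_cases hu0 : u ∈ PySem.Set.ofList ([0] : List Int)
        · have : u = 0 := by rw [ofList_zero] at hu0; simpa using hu0
          subst this
          exact hsat.1 k hk
        · exact hsat.2 u ihu hu0 k hk

-- ---------- B side ----------

lemma loopB_nodup (rooms : List (List Int)) :
    ∀ (fuel : Nat) (v : PySem.Set Int) (s : List Int), v.Nodup → (loopB rooms fuel v s).Nodup := by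
  intro fuel
  induction fuel with
  | zero => intro v s h; simpa [loopB] using h
  | succ f ih =>
      intro v s h
      cases s with
      | nil => simpa [loopB] using h
      | cons node rest =>
          rw [loopB]
          apply ih
          refine List.foldlRecOn (motive := fun (p : PySem.Set Int × List Int) => p.1.Nodup) _ _ h ?_
          intro b hb a _
          by_cases hm : a ∈ b.1
          · rw [if_cont_true hm]; exact hb
          · rw [if_cont_false hm]
            exact PySem.Set.nodup_add b.1 a hb

lemma loopB_sound (rooms : List (List Int)) :
    ∀ (fuel : Nat) (v : PySem.Set Int) (s : List Int),
      (∀ x ∈ v, Reach rooms x) → (∀ x ∈ s, Reach rooms x) →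
      ∀ x ∈ loopB rooms fuel v s, Reach rooms x := by
  intro fuel
  induction fuel with
  | zero => intro v s hv _ x hx; rw [loopB] at hx; exact hv x hx
  | succ f ih =>
      intro v s hv hs x hx
      cases s with
      | nil => rw [loopB] at hx; exact hv x hx
      | cons node rest =>
          rw [loopB] at hx
          have hnode : Reach rooms node := hs node List.mem_cons_self
          have hfold : (∀ y ∈ (((PySem.List.pyGet? rooms node).getD []).foldl
                (fun (p : PySem.Set Int × List Int) key =>
                  if PySem.Set.contains p.1 key then p
                  else (PySem.Set.add p.1 key, key :: p.2)) (v, rest)).1, Reach rooms y) ∧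
              (∀ y ∈ (((PySem.List.pyGet? rooms node).getD []).foldl
                (fun (p : PySem.Set Int × List Int) key =>
                  if PySem.Set.contains p.1 key then p
                  else (PySem.Set.add p.1 key, key :: p.2)) (v, rest)).2, Reach rooms y) := by
            refine List.foldlRecOn
              (motive := fun (p : PySem.Set Int × List Int) => (∀ y ∈ p.1, Reach rooms y) ∧ (∀ y ∈ p.2, Reach rooms y)) _ _
              ⟨hv, fun y hy => hs y (List.mem_cons_of_mem _ hy)⟩ ?_
            intro b hb a ha
            by_cases hm : a ∈ b.1
            · rw [if_cont_true hm]; exact hb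
            · rw [if_cont_false hm]
              have hra : Reach rooms a := Reach.step hnode (show a ∈ nb rooms node from ha)
              refine ⟨fun y hy => ?_, fun y hy => ?_⟩
              · rcases (PySem.Set.mem_add b.1 a y).1 hy with h | h
                · exact hb.1 y h
                · subst h; exact hra
              · rcases List.mem_cons.1 hy with h | h
                · subst h; exact hra
                · exact hb.2 y h
          exact ih _ _ hfold.1 hfold.2 x hx

-- fold invariants for one pop of B's loop
lemma foldB_inv (rooms : List (List Int)) :
    ∀ (l : List Int) (v : PySem.Set Int) (s : List Int), (∀ k ∈ l, k ∈ rooms.flatten) →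
      (∀ x ∈ v, x ∈ (l.foldl (fun (p : PySem.Set Int × List Int) key =>
          if PySem.Set.contains p.1 key then p
          else (PySem.Set.add p.1 key, key :: p.2)) (v, s)).1) ∧
      (∀ k ∈ l, k ∈ (l.foldl (fun (p : PySem.Set Int × List Int) key =>
          if PySem.Set.contains p.1 key then p
          else (PySem.Set.add p.1 key, key :: p.2)) (v, s)).1) ∧
      (∀ x ∈ s, x ∈ (l.foldl (fun (p : PySem.Set Int × List Int) key =>
          if PySem.Set.contains p.1 key then p
          else (PySem.Set.add p.1 key, key :: p.2)) (v, s)).2) ∧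
      (∀ x ∈ (l.foldl (fun (p : PySem.Set Int × List Int) key =>
          if PySem.Set.contains p.1 key then p
          else (PySem.Set.add p.1 key, key :: p.2)) (v, s)).2,
        x ∈ s ∨ x ∈ (l.foldl (fun (p : PySem.Set Int × List Int) key =>
          if PySem.Set.contains p.1 key then p
          else (PySem.Set.add p.1 key, key :: p.2)) (v, s)).1) ∧
      (∀ u ∈ (l.foldl (fun (p : PySem.Set Int × List Int) key =>
          if PySem.Set.contains p.1 key then p
          else (PySem.Set.add p.1 key, key :: p.2)) (v, s)).1,
        u ∈ v ∨ u ∈ (l.foldl (fun (p : PySem.Set Int × List Int) key =>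
          if PySem.Set.contains p.1 key then p
          else (PySem.Set.add p.1 key, key :: p.2)) (v, s)).2) ∧
      ((l.foldl (fun (p : PySem.Set Int × List Int) key =>
          if PySem.Set.contains p.1 key then p
          else (PySem.Set.add p.1 key, key :: p.2)) (v, s)).2.length
        + 2 * miss rooms (l.foldl (fun (p : PySem.Set Int × List Int) key =>
          if PySem.Set.contains p.1 key then p
          else (PySem.Set.add p.1 key, key :: p.2)) (v, s)).1
        ≤ s.length + 2 * miss rooms v) := by
  intro l
  induction l with
  | nil =>
      intro v s _
      exact ⟨fun x hx => hx, by simp, fun x hx => hx, fun x hx => Or.inl hx,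
        fun u hu => Or.inl hu, le_refl _⟩
  | cons key rest ihl =>
      intro v s hl
      by_cases hm : key ∈ v
      · have hstep : (if PySem.Set.contains (v, s).1 key then (v, s)
            else (PySem.Set.add (v, s).1 key, key :: (v, s).2)) = (v, s) := by
          exact if_cont_true hm _ _
        simp only [List.foldl_cons, hstep]
        obtain ⟨h1, h2, h3, h4, h5, h6⟩ := ihl v s (fun k hk => hl k (List.mem_cons_of_mem _ hk))
        refine ⟨h1, ?_, h3, h4, h5, h6⟩
        intro k hk
        rcases List.mem_cons.1 hk with h | h
        · exact h ▸ h1 key hm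
        · exact h2 k h
      · have hkf : key ∈ rooms.flatten := hl key List.mem_cons_self
        have hstep : (if PySem.Set.contains (v, s).1 key then (v, s)
            else (PySem.Set.add (v, s).1 key, key :: (v, s).2))
            = (PySem.Set.add v key, key :: s) := by
          exact if_cont_false hm _ _
        simp only [List.foldl_cons, hstep]
        obtain ⟨h1, h2, h3, h4, h5, h6⟩ :=
          ihl (PySem.Set.add v key) (key :: s) (fun k hk => hl k (List.mem_cons_of_mem _ hk))
        have hlt : miss rooms (PySem.Set.add v key) < miss rooms v := miss_add_lt hkf hm
        refine ⟨?_, ?_, ?_, ?_, ?_, ?_⟩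
        · intro x hx; exact h1 x (mem_add_left hx)
        · intro k hk
          rcases List.mem_cons.1 hk with h | h
          · exact h ▸ h1 key (mem_add_self v key)
          · exact h2 k h
        · intro x hx; exact h3 x (List.mem_cons_of_mem _ hx)
        · intro x hx
          rcases h4 x hx with h | h
          · rcases List.mem_cons.1 h with h' | h'
            · exact Or.inr (h' ▸ h1 key (mem_add_self v key))
            · exact Or.inl h'
          · exact Or.inr h
        · intro u hu
          rcases h5 u hu with h | h
          · rcases (PySem.Set.mem_add v key u).1 h with h' | h'
            · exact Or.inl h'
            · exact Or.inr (h3 u (h' ▸ List.mem_cons_self))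
          · exact Or.inr h
        · simp only [List.length_cons] at h6
          omega

-- with enough fuel and the loop invariant, B's visited set ends up saturated
lemma loopB_sat (rooms : List (List Int)) :
    ∀ (fuel : Nat) (v : PySem.Set Int) (s : List Int),
      s.length + 2 * miss rooms v < fuel →
      (∀ x ∈ s, x ∈ v) →
      (∀ u ∈ v, u ∈ s ∨ ∀ k ∈ nb rooms u, k ∈ v) →
      (∀ x ∈ v, x ∈ loopB rooms fuel v s) ∧
      (∀ u ∈ loopB rooms fuel v s, ∀ k ∈ nb rooms u, k ∈ loopB rooms fuel v s) := by
  intro fuel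
  induction fuel with
  | zero => intro v s h; omega
  | succ f ih =>
      intro v s hfuel hsv hinv
      cases s with
      | nil =>
          rw [loopB]
          refine ⟨fun x hx => hx, fun u hu k hk => ?_⟩
          rcases hinv u hu with h | h
          · simp at h
          · exact h k hk
      | cons node rest =>
          rw [loopB]
          obtain ⟨h1, h2, h3, h4, h5, h6⟩ :=
            foldB_inv rooms (nb rooms node) v rest (fun k hk => nb_sub_flatten hk)
          have hfuel' : ((nb rooms node).foldl
              (fun (p : PySem.Set Int × List Int) key =>
                if PySem.Set.contains p.1 key then p
                else (PySem.Set.add p.1 key, key :: p.2)) (v, rest)).2.length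
              + 2 * miss rooms ((nb rooms node).foldl
              (fun (p : PySem.Set Int × List Int) key =>
                if PySem.Set.contains p.1 key then p
                else (PySem.Set.add p.1 key, key :: p.2)) (v, rest)).1 < f := by
            have := h6
            simp only [List.length_cons] at hfuel
            exact by omega
          have hsv' : ∀ x ∈ ((nb rooms node).foldl
              (fun (p : PySem.Set Int × List Int) key =>
                if PySem.Set.contains p.1 key then p
                else (PySem.Set.add p.1 key, key :: p.2)) (v, rest)).2,
              x ∈ ((nb rooms node).foldl
              (fun (p : PySem.Set Int × List Int) key =>
                if PySem.Set.contains p.1 key then p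
                else (PySem.Set.add p.1 key, key :: p.2)) (v, rest)).1 := by
            intro x hx
            rcases h4 x hx with h | h
            · exact h1 x (hsv x (List.mem_cons_of_mem _ h))
            · exact h
          have hinv' : ∀ u ∈ ((nb rooms node).foldl
              (fun (p : PySem.Set Int × List Int) key =>
                if PySem.Set.contains p.1 key then p
                else (PySem.Set.add p.1 key, key :: p.2)) (v, rest)).1,
              u ∈ ((nb rooms node).foldl
              (fun (p : PySem.Set Int × List Int) key =>
                if PySem.Set.contains p.1 key then p
                else (PySem.Set.add p.1 key, key :: p.2)) (v, rest)).2 ∨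
              ∀ k ∈ nb rooms u, k ∈ ((nb rooms node).foldl
              (fun (p : PySem.Set Int × List Int) key =>
                if PySem.Set.contains p.1 key then p
                else (PySem.Set.add p.1 key, key :: p.2)) (v, rest)).1 := by
            intro u hu
            rcases h5 u hu with h | h
            · rcases hinv u h with h' | h'
              · rcases List.mem_cons.1 h' with h'' | h''
                · subst h''
                  exact Or.inr (fun k hk => h2 k hk)
                · exact Or.inl (h3 u h'')
              · exact Or.inr (fun k hk => h1 k (h' k hk))
            · exact Or.inl h
          have hcall := ih _ _ hfuel' hsv' hinv'
          exact ⟨fun x hx => hcall.1 x (h1 x hx), hcall.2⟩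

def finalB (rooms : List (List Int)) : PySem.Set Int :=
  loopB rooms (2 * rooms.flatten.length + 2) (PySem.Set.ofList ([0] : List Int)) [0]

lemma finalB_iff (rooms : List (List Int)) :
    ∀ x, x ∈ finalB rooms ↔ Reach rooms x := by
  have hfuel : ([0] : List Int).length + 2 * miss rooms (PySem.Set.ofList ([0] : List Int))
      < 2 * rooms.flatten.length + 2 := by
    rw [ofList_zero]
    have := miss_init_le rooms
    simp only [List.length_cons, List.length_nil]
    omega
  have hsat := loopB_sat rooms (2 * rooms.flatten.length + 2)
    (PySem.Set.ofList ([0] : List Int)) [0] hfuel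
    (by rw [ofList_zero]; intro x hx; exact hx)
    (by intro u hu; rw [ofList_zero] at hu; exact Or.inl hu)
  intro x
  constructor
  · intro hx
    refine loopB_sound rooms _ _ _ ?_ ?_ x hx
    · rw [ofList_zero]
      intro y hy
      have : y = 0 := by simpa using hy
      subst this; exact Reach.zero
    · intro y hy
      have : y = 0 := by simpa using hy
      subst this; exact Reach.zero
  · intro hr
    induction hr with
    | zero =>
        refine hsat.1 0 ?_
        rw [ofList_zero]; simp
    | step hru hk ihu =>
        rename_i u k
        exact hsat.2 u ihu k hk

-- the two visited sets are permutations, hence have equal length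
lemma final_length_eq (rooms : List (List Int)) :
    (finalA rooms).length = (finalB rooms).length := by
  have hA : (finalA rooms).Nodup :=
    dfsA_nodup rooms _ 0 _ (by rw [ofList_zero]; simp)
  have hB : (finalB rooms).Nodup :=
    loopB_nodup rooms _ _ _ (by rw [ofList_zero]; simp)
  have hperm : (finalA rooms).Perm (finalB rooms) := by
    rw [List.perm_ext_iff_of_nodup hA hB]
    intro a
    rw [finalA_iff rooms a, finalB_iff rooms a]
  exact hperm.length_eq

-- ===== VERDICT (by name: the statement is the Claim_ definition above) =====
theorem canVisitAllRooms2_spec : Claim_equal_canVisitAllRooms2 := by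
  intro rooms _ _
  unfold Spec_canVisitAllRooms2 canVisitAllRooms2 canVisitAllRooms2_alt
  have h := final_length_eq rooms
  unfold finalA finalB at h
  simp only [h]
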